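-- pv_equiv track=rewrite | github.com/m1ntm1nd/dz_algo_1 | algotinkov/pythpn/2_1.py | hashed
-- ===== SOURCE A (Python) =====
-- def hashed(s,ppower):
--     M = 10**9 + 7
--     res = 0
--     hashed = []
--     for i in range(len(s)):
--         res = (res + (ord(s[i])-ord('a')+1) * ppower[i]) % M
--         hashed.append(res)
--     return hashed
-- ===== SOURCE B (Python) =====
-- def hashed(s, ppower):
--     M = 10**9 + 7
--     # term table (explicit indexing so a short ppower still raises IndexError)
--     terms = [(ord(s[i]) - ord('a') + 1) * ppower[i] for i in range(len(s))]
--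
--     # divide and conquer: prefix hashes of each half, right half offset by the
--     # left half's last value (mod distributes over the addition)
--     def scan(ts):
--         if len(ts) <= 1:
--             return [t % M for t in ts]
--         mid = len(ts) // 2
--         left = scan(ts[:mid])
--         right = scan(ts[mid:])
--         off = left[-1]
--         return left + [(off + r) % M for r in right]
--
--     return scan(terms)
-- ===== Notes on version B (the rewrite author's own statement) =====
-- stated objective: alternative
-- what changed: A's single-pass loop with a running accumulator reduced mod M each step is replaced by a two-stage design: build a term table, then compute the prefix hashes by a recursive divide-and-conquer scan (prefix hashes of each half, the right half offset by the left half's last value mod M).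
import Mathlib
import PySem

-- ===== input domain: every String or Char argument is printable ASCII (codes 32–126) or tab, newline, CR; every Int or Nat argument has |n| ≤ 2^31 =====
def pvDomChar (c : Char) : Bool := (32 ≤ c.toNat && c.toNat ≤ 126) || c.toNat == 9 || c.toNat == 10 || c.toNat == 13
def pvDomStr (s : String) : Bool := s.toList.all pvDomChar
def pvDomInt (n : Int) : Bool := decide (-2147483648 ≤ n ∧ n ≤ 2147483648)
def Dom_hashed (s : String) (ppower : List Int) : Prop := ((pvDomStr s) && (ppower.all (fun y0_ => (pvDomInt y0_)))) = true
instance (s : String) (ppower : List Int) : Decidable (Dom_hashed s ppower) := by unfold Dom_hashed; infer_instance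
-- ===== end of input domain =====

-- B replaces A's single-pass running accumulator by a recursive divide-and-conquer
-- prefix scan over a term table (right half offset by the left half's last value).

-- ===== PORT A =====
-- A's single loop: running hash res reduced mod M each step, appended to the output.
def hashed (s : String) (ppower : List Int) : List Int :=
  let M : Int := 10 ^ 9 + 7
  let cs := s.toList
  ((List.range cs.length).foldl
    (fun (st : Int × List Int) i =>
      let res := PySem.Int.mod (st.1 + (((cs.getD i ' ').toNat : Int) - 96) * ppower.getD i 0) M
      (res, st.2 ++ [res]))
    (0, [])).2

-- ===== PORT B =====
-- Source B's scan: prefix hashes of each half, right half offset by left[-1].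
-- (left is nonempty whenever the recursive branch runs, so getLastD 0 is exact
-- for Python's left[-1] there; the base-case guard makes the recursion total.)
def pvScan (M : Int) (ts : List Int) : List Int :=
  if ts.length ≤ 1 then ts.map (fun t => PySem.Int.mod t M)
  else
    let mid := ts.length / 2
    let left := pvScan M (ts.take mid)
    let right := pvScan M (ts.drop mid)
    let off := left.getLastD 0
    left ++ right.map (fun r => PySem.Int.mod (off + r) M)
termination_by ts.length
decreasing_by
  · simp only [List.length_take]; omega
  · simp only [List.length_drop]; omega

def hashed_alt (s : String) (ppower : List Int) : List Int :=
  let M : Int := 10 ^ 9 + 7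
  let cs := s.toList
  let terms := (List.range cs.length).map
    (fun i => (((cs.getD i ' ').toNat : Int) - 96) * ppower.getD i 0)
  pvScan M terms

-- ===== PRECONDITION & SPEC =====
-- A raises IndexError when ppower is shorter than s (ppower[i] out of range).
def Pre_hashed (s : String) (ppower : List Int) : Prop := s.toList.length ≤ ppower.length
instance (s : String) (ppower : List Int) : Decidable (Pre_hashed s ppower) := by unfold Pre_hashed; infer_instance
def pvWitness_hashed : String × List Int := ("abc", [1, 31, 961])
def Spec_hashed (s : String) (ppower : List Int) (out : List Int) : Prop := out = hashed_alt s ppower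
instance (s : String) (ppower : List Int) (out : List Int) : Decidable (Spec_hashed s ppower out) := by unfold Spec_hashed; infer_instance

-- ===== CLAIM (what is proved, stated in full; the proofs are below) =====
def Claim_equal_hashed : Prop := ∀ (s : String) (ppower : List Int), Dom_hashed s ppower → Pre_hashed s ppower → Spec_hashed s ppower (hashed s ppower)

-- ===== LEMMAS AND PROOFS =====

-- A's fused loop over terms t, both components at once: the accumulator is the
-- reduced full sum, and the output list collects the reduced prefix sums.
theorem pv_fused_eq_sums (M : Int) (t : Nat → Int) (n : Nat) :
    (List.range n).foldl
      (fun (st : Int × List Int) i => ((st.1 + t i) % M, st.2 ++ [(st.1 + t i) % M]))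
      (0, [])
    = (((List.range n).foldl (fun a i => a + t i) 0) % M,
       (List.range n).map (fun k =>
         ((List.range (k + 1)).foldl (fun a i => a + t i) 0) % M)) := by
  induction n with
  | zero => simp
  | succ n ih =>
    rw [List.range_succ, List.foldl_append, List.foldl_append, List.map_append, ih]
    simp [Int.emod_add_emod, List.range_succ]

-- getLastD of a map over a nonempty range is the image of the last index.
theorem pv_getLastD_map_range (f : Nat → Int) (m : Nat) (hm : 0 < m) (d : Int) :
    (((List.range m).map f).getLastD d) = f (m - 1) := by
  obtain ⟨m, rfl⟩ := Nat.exists_eq_succ_of_ne_zero (Nat.pos_iff_ne_zero.mp hm)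
  simp [List.range_succ]

-- pvScan computes, at M = 10^9+7, the reduced sums of all nonempty prefixes.
theorem pv_scan_eq (ts : List Int) :
    pvScan (10 ^ 9 + 7) ts
      = (List.range ts.length).map (fun k => ((ts.take (k + 1)).sum) % (10 ^ 9 + 7)) := by
  have hM : (0 : Int) < 10 ^ 9 + 7 := by norm_num
  have main : ∀ n (ts : List Int), ts.length ≤ n →
      pvScan (10 ^ 9 + 7) ts
        = (List.range ts.length).map (fun k => ((ts.take (k + 1)).sum) % (10 ^ 9 + 7)) := by
    intro n
    induction n with
    | zero =>
      intro ts h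
      have : ts = [] := List.length_eq_zero_iff.mp (Nat.le_zero.mp h)
      subst this; rw [pvScan]; simp
    | succ n ih =>
      intro ts h
      rw [pvScan]
      by_cases hlen : ts.length ≤ 1
      · rcases ts with _ | ⟨a, _ | ⟨b, ts⟩⟩
        · simp
        · simp
        · simp at hlen
      · simp only [if_neg hlen]
        have hlen2 : 2 ≤ ts.length := by omega
        have hts : (ts.take (ts.length / 2)).length = ts.length / 2 := by
          simp only [List.length_take]; omega
        have hds : (ts.drop (ts.length / 2)).length = ts.length - ts.length / 2 := by
          simp only [List.length_drop]
        rw [ih (ts.take (ts.length / 2)) (by rw [hts]; omega),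
            ih (ts.drop (ts.length / 2)) (by rw [hds]; omega)]
        rw [hts, hds]
        -- the offset is the reduced sum of the left half
        rw [pv_getLastD_map_range _ _ (by omega) 0]
        have hoff : ((ts.take (ts.length / 2)).take ((ts.length / 2 - 1) + 1)).sum
            = (ts.take (ts.length / 2)).sum := by
          rw [show (ts.length / 2 - 1) + 1 = ts.length / 2 by omega, List.take_take,
              Nat.min_self]
        rw [hoff]
        -- split the right-hand range at the midpoint
        conv_rhs => rw [show ts.length = ts.length / 2 + (ts.length - ts.length / 2) by omega]
        rw [List.range_add, List.map_append, List.map_map]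
        congr 1
        · apply List.map_congr_left
          intro k hk
          rw [List.mem_range] at hk
          rw [List.take_take, Nat.min_eq_left (by omega)]
        · rw [List.map_map]
          apply List.map_congr_left
          intro k hk
          rw [List.mem_range] at hk
          simp only [Function.comp]
          rw [PySem.Int.mod_eq_emod_of_pos hM]
          conv_rhs => rw [show ts.length / 2 + k + 1 = ts.length / 2 + (k + 1) by omega,
              List.take_add]
          rw [List.sum_append]
          exact (Int.add_emod _ _ _).symm
  exact main ts.length ts le_rfl

-- ===== VERDICT (by name: the statement is the Claim_ definition above) =====
theorem hashed_spec : Claim_equal_hashed := by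
  intro s ppower _ _
  unfold Spec_hashed hashed hashed_alt
  simp only [PySem.Int.mod_eq_emod_of_pos (show (0:Int) < 10 ^ 9 + 7 by norm_num)]
  rw [pv_fused_eq_sums, pv_scan_eq]
  simp only [List.length_map, List.length_range]
  apply List.map_congr_left
  intro k hk
  rw [List.mem_range] at hk
  rw [← List.map_take, List.take_range, Nat.min_eq_left (by omega)]
  simp [List.sum_eq_foldl, List.foldl_map]
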